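-- pv_equiv track=rewrite | github.com/raf945/Job_Scheduling_Problem | main.py | getJobProcess
-- ===== SOURCE A (Python) =====
-- def getJobProcess(childJobValues, basicJobOrder):
--     # Create a lookup: job name -> full dict
--     job_lookup = {job['job']: job for job in basicJobOrder}
--
--     # This is loop that looks through a job dictionary and assigned the child job value to the job order
--     result = []
--     for job_name in childJobValues:
--         if job_name in job_lookup:
--             result.append(job_lookup[job_name])
--         else:
--             raise ValueError(f"Job {job_name} not found in basic job order!")
--
--     return result
-- ===== SOURCE B (Python) =====
-- def getJobProcess(childJobValues, basicJobOrder):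
--     # Invert the problem: index the requested names by position, then one pass
--     # over basicJobOrder drops each entry into every slot that asks for it.
--     positions = {}
--     for i, name in enumerate(childJobValues):
--         positions.setdefault(name, []).append(i)
--     slots = [None] * len(childJobValues)
--     for job in basicJobOrder:
--         for i in positions.get(job['job'], []):
--             slots[i] = job
--     result = []
--     for name, job in zip(childJobValues, slots):
--         if job is None:
--             raise ValueError(f"Job {name} not found in basic job order!")
--         result.append(job)
--     return result
-- ===== Notes on version B (the rewrite author's own statement) =====
-- stated objective: alternative
-- what changed: Inverted the indexing: instead of building a name->dict table over basicJobOrder and looking each requested name up, B indexes the requested names by output position and fills a slot array in a single pass over basicJobOrder (later entries overwrite earlier ones).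
import Mathlib
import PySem

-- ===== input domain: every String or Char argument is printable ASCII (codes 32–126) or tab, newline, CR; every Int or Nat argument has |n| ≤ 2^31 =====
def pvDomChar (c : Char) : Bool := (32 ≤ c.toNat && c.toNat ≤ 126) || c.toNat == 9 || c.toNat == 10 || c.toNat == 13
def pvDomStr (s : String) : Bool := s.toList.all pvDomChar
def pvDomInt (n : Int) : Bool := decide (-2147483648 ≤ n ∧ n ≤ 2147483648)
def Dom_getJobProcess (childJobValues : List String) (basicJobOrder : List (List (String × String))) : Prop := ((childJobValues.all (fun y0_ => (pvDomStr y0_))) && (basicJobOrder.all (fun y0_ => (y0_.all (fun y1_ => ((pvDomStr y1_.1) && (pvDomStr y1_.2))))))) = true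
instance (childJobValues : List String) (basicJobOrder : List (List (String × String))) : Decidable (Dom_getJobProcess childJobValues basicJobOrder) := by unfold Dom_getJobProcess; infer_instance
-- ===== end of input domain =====

-- B inverts A's indexing: instead of a name->dict table over the data, it indexes the
-- requested names by position and fills an output slot array in one pass over the data.

-- jobGet? d = d.get('job') on the association-list dict (first match, per the type convention)
def jobGet? (d : List (String × String)) : Option String :=
  (d.find? (fun p => p.1 == "job")).map (·.2)

-- ===== PORT A =====
def getJobProcess (childJobValues : List String) (basicJobOrder : List (List (String × String))) : List (List (String × String)) :=
  -- job_lookup = {job['job']: job for job in basicJobOrder}; the key default "" is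
  -- never used under Pre_ (every entry has the 'job' key).
  let job_lookup : PySem.Dict String (List (String × String)) :=
    basicJobOrder.foldl (fun acc job => acc.insert ((jobGet? job).getD "") job) PySem.Dict.empty
  -- loop: append job_lookup[job_name]; the missing-name branch raises → excluded by Pre_
  childJobValues.foldl (fun result job_name => result ++ [(job_lookup.get? job_name).getD []]) []

-- ===== PORT B =====
-- 'for i, name in enumerate(childJobValues): positions.setdefault(name, []).append(i)'
def posLoop (names : List String) (i : Nat) (d : PySem.Dict String (List Nat)) :
    PySem.Dict String (List Nat) :=
  match names with
  | [] => d
  | n :: rest => posLoop rest (i + 1) (d.insert n (d.getD n [] ++ [i]))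

def getJobProcess_alt (childJobValues : List String) (basicJobOrder : List (List (String × String))) : List (List (String × String)) :=
  let positions := posLoop childJobValues 0 PySem.Dict.empty
  -- 'for job in basicJobOrder: for i in positions.get(job['job'], []): slots[i] = job';
  -- the key default "" is never used under Pre_ (every entry has the 'job' key).
  let slots : List (Option (List (String × String))) :=
    basicJobOrder.foldl
      (fun sl job =>
        (positions.getD ((jobGet? job).getD "") []).foldl (fun s i => s.set i (some job)) sl)
      (List.replicate childJobValues.length none)
  -- 'for name, job in zip(...): if job is None: raise ...; result.append(job)';
  -- the None branch raises → excluded by Pre_, so .getD [] is never used.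
  (childJobValues.zip slots).foldl (fun result p => result ++ [p.2.getD []]) []

-- ===== PRECONDITION & SPEC =====
-- A raises KeyError if some entry of basicJobOrder lacks the 'job' key, and ValueError
-- if some requested name has no entry; Pre_ excludes exactly those inputs.
def Pre_getJobProcess (childJobValues : List String) (basicJobOrder : List (List (String × String))) : Prop :=
  (∀ d ∈ basicJobOrder, (jobGet? d).isSome) ∧
  (∀ n ∈ childJobValues, ∃ d ∈ basicJobOrder, jobGet? d = some n)
instance (childJobValues : List String) (basicJobOrder : List (List (String × String))) : Decidable (Pre_getJobProcess childJobValues basicJobOrder) := by unfold Pre_getJobProcess; infer_instance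

def pvWitness_getJobProcess : List String × (List (List (String × String))) :=
  (["a"], [[("job", "a"), ("time", "1")], [("job", "b")]])

def Spec_getJobProcess (childJobValues : List String) (basicJobOrder : List (List (String × String))) (out : List (List (String × String))) : Prop := out = getJobProcess_alt childJobValues basicJobOrder
instance (childJobValues : List String) (basicJobOrder : List (List (String × String))) (out : List (List (String × String))) : Decidable (Spec_getJobProcess childJobValues basicJobOrder out) := by unfold Spec_getJobProcess; infer_instance

-- ===== CLAIM (what is proved, stated in full; the proofs are below) =====
def Claim_equal_getJobProcess : Prop := ∀ (childJobValues : List String) (basicJobOrder : List (List (String × String))), Dom_getJobProcess childJobValues basicJobOrder → Pre_getJobProcess childJobValues basicJobOrder → Spec_getJobProcess childJobValues basicJobOrder (getJobProcess childJobValues basicJobOrder)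

-- ===== LEMMAS AND PROOFS =====

-- last-match scan: the common characterisation both sides are reduced to
def findJob (job_name : String) (basicJobOrder : List (List (String × String))) : Option (List (String × String)) :=
  basicJobOrder.foldl (fun found job => if jobGet? job == some job_name then some job else found) none

-- A's dict lookup after the insert loop = the last-match scan, with any accumulator.
lemma lookup_eq_findJob_aux (n : String) (bs : List (List (String × String)))
    (acc : PySem.Dict String (List (String × String)))
    (h : ∀ d ∈ bs, (jobGet? d).isSome) :
    (bs.foldl (fun a job => a.insert ((jobGet? job).getD "") job) acc).get? n
      = bs.foldl (fun found job => if jobGet? job == some n then some job else found) (acc.get? n) := by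
  induction bs generalizing acc with
  | nil => rfl
  | cons d bs ih =>
    obtain ⟨s, hs⟩ := Option.isSome_iff_exists.mp (h d (List.mem_cons_self ..))
    simp only [List.foldl_cons]
    rw [ih _ (fun d hd => h d (List.mem_cons_of_mem _ hd))]
    congr 1
    rw [hs, PySem.Dict.get?_insert]
    simp only [Option.getD_some, beq_iff_eq, Option.some.injEq]
    by_cases hsn : n = s
    · simp [hsn]
    · rw [if_neg hsn, if_neg (fun h => hsn (Eq.symm h))]

lemma lookup_eq_findJob (n : String) (bs : List (List (String × String)))
    (h : ∀ d ∈ bs, (jobGet? d).isSome) :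
    (bs.foldl (fun a job => a.insert ((jobGet? job).getD "") job) PySem.Dict.empty).get? n
      = findJob n bs := by
  rw [findJob, lookup_eq_findJob_aux n bs _ h, PySem.Dict.get?_empty]

-- the positions dict indexes exactly the occurrences of each name
lemma posLoop_mem (names : List String) (i j : Nat) (d : PySem.Dict String (List Nat)) (n : String) :
    j ∈ (posLoop names i d).getD n [] ↔
      j ∈ d.getD n [] ∨ ∃ k, ∃ _ : k < names.length, names[k] = n ∧ j = i + k := by
  induction names generalizing i d with
  | nil => simp [posLoop]
  | cons m rest ih =>
    rw [posLoop, ih]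
    constructor
    · rintro (hj | ⟨k, hk, hkn, hjk⟩)
      · rw [PySem.Dict.getD_insert] at hj
        by_cases hnm : n = m
        · subst hnm; rw [if_pos rfl] at hj
          rcases List.mem_append.mp hj with h | h
          · exact Or.inl h
          · have hji : j = i := List.mem_singleton.mp h
            exact Or.inr ⟨0, by simp, by simp, by omega⟩
        · rw [if_neg hnm] at hj; exact Or.inl hj
      · refine Or.inr ⟨k + 1, by simpa using Nat.succ_lt_succ hk, by simpa using hkn, by omega⟩
    · rintro (hj | ⟨k, hk, hkn, hjk⟩)
      · left; rw [PySem.Dict.getD_insert]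
        by_cases hnm : n = m
        · subst hnm; rw [if_pos rfl]; exact List.mem_append.mpr (Or.inl hj)
        · rwa [if_neg hnm]
      · match k, hk, hkn, hjk with
        | 0, _, hkn, hjk =>
          left; rw [PySem.Dict.getD_insert]
          simp only [List.getElem_cons_zero] at hkn; subst hkn
          rw [if_pos rfl]; simp; omega
        | k + 1, hk, hkn, hjk =>
          right
          exact ⟨k, by simpa using Nat.lt_of_succ_lt_succ (by simpa using hk),
            by simpa using hkn, by omega⟩

lemma positions_mem (cs : List String) (j : Nat) (n : String) :
    j ∈ (posLoop cs 0 PySem.Dict.empty).getD n [] ↔ cs[j]? = some n := by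
  rw [posLoop_mem]
  simp only [PySem.Dict.getD_empty, List.not_mem_nil, false_or]
  constructor
  · rintro ⟨k, hk, hkn, hjk⟩
    subst hjk
    simp only [Nat.zero_add]
    simp [List.getElem?_eq_getElem hk, hkn]
  · intro h
    have hj : j < cs.length := by
      by_contra hj
      rw [List.getElem?_eq_none (by omega)] at h; simp at h
    exact ⟨j, hj, by rw [List.getElem?_eq_getElem hj] at h; exact Option.some.inj h, by omega⟩

-- setting (the same value) at every index of a list of positions
lemma setAll_getElem? {α : Type} (idxs : List Nat) (v : α) (i : Nat) :
    ∀ (sl : List α),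
      (idxs.foldl (fun s j => s.set j v) sl)[i]? =
        if i ∈ idxs ∧ i < sl.length then some v else sl[i]? := by
  induction idxs with
  | nil => intro sl; simp
  | cons j idxs ih =>
    intro sl
    rw [List.foldl_cons, ih]
    simp only [List.length_set, List.mem_cons]
    by_cases hmem : i ∈ idxs ∧ i < sl.length
    · rw [if_pos hmem, if_pos ⟨Or.inr hmem.1, hmem.2⟩]
    · rw [if_neg hmem, List.getElem?_set]
      by_cases hji : j = i
      · subst hji
        by_cases hl : j < sl.length
        · simp [hl]
        · rw [if_pos rfl, if_neg hl, if_neg (fun h => hl h.2), List.getElem?_eq_none (by omega)]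
      · have hcond : ¬((i = j ∨ i ∈ idxs) ∧ i < sl.length) := by
          rintro ⟨h | h, hlen⟩
          · exact hji h.symm
          · exact hmem ⟨h, hlen⟩
        rw [if_neg hji, if_neg hcond]

lemma setAll_length {α : Type} (idxs : List Nat) (v : α) :
    ∀ (sl : List α), (idxs.foldl (fun s j => s.set j v) sl).length = sl.length := by
  induction idxs with
  | nil => intro sl; rfl
  | cons j idxs ih => intro sl; rw [List.foldl_cons, ih, List.length_set]

-- filling the slot array: slot i ends up as the last-match scan for cs[i]
lemma fill_getElem? (cs : List String) (bs : List (List (String × String)))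
    (h : ∀ d ∈ bs, (jobGet? d).isSome)
    (i : Nat) (n : String) (hn : cs[i]? = some n) :
    ∀ (sl : List (Option (List (String × String)))) (o : Option (List (String × String))),
      sl.length = cs.length → sl[i]? = some o →
      ((bs.foldl
          (fun sl job =>
            ((posLoop cs 0 PySem.Dict.empty).getD ((jobGet? job).getD "") []).foldl
              (fun s i => s.set i (some job)) sl)
          sl)[i]? =
        some (bs.foldl
          (fun found job => if jobGet? job == some n then some job else found) o)) := by
  have hi : i < cs.length := by
    by_contra hj
    rw [List.getElem?_eq_none (by omega)] at hn; simp at hn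
  induction bs with
  | nil => intro _ _ _ h; simpa using h
  | cons job bs ih =>
    intro sl o hlen hsl
    obtain ⟨s, hs⟩ := Option.isSome_iff_exists.mp (h job (List.mem_cons_self ..))
    rw [List.foldl_cons, List.foldl_cons]
    apply ih (fun d hd => h d (List.mem_cons_of_mem _ hd))
    · rw [setAll_length, hlen]
    · rw [setAll_getElem?, hs]
      simp only [Option.getD_some, beq_iff_eq, Option.some.injEq]
      have hmem : i ∈ (posLoop cs 0 PySem.Dict.empty).getD s [] ↔ s = n := by
        rw [positions_mem, hn]
        exact ⟨fun h => (Option.some.inj h).symm, fun h => by rw [h]⟩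
      by_cases hsn : s = n
      · rw [if_pos ⟨hmem.mpr hsn, by omega⟩, if_pos hsn]
      · rw [if_neg (fun hc => hsn (hmem.mp hc.1)), if_neg hsn]
        exact hsl

lemma fill_length (cs : List String) (bs : List (List (String × String))) :
    ∀ (sl : List (Option (List (String × String)))),
      (bs.foldl
          (fun sl job =>
            ((posLoop cs 0 PySem.Dict.empty).getD ((jobGet? job).getD "") []).foldl
              (fun s i => s.set i (some job)) sl)
          sl).length = sl.length := by
  induction bs with
  | nil => intro sl; rfl
  | cons job bs ih => intro sl; rw [List.foldl_cons, ih, setAll_length]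

-- foldl-append accumulators are maps
lemma foldl_append_eq_map {α β : Type} (f : α → β) (l : List α) :
    ∀ (acc : List β), l.foldl (fun r x => r ++ [f x]) acc = acc ++ l.map f := by
  induction l with
  | nil => intro acc; simp
  | cons x l ih => intro acc; rw [List.foldl_cons, ih, List.map_cons]; simp

-- ===== VERDICT (by name: the statement is the Claim_ definition above) =====
theorem getJobProcess_spec : Claim_equal_getJobProcess := by
  intro cs bs _ hpre
  simp only [Spec_getJobProcess, getJobProcess, getJobProcess_alt]
  rw [foldl_append_eq_map (fun job_name =>
        ((bs.foldl (fun acc job => acc.insert ((jobGet? job).getD "") job)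
            PySem.Dict.empty).get? job_name).getD []),
      foldl_append_eq_map (fun p : String × Option (List (String × String)) => p.2.getD []),
      List.nil_append, List.nil_append]
  set slots := bs.foldl
      (fun sl job =>
        ((posLoop cs 0 PySem.Dict.empty).getD ((jobGet? job).getD "") []).foldl
          (fun s i => s.set i (some job)) sl)
      (List.replicate cs.length none) with hslots
  have hslen : slots.length = cs.length := by
    rw [hslots, fill_length, List.length_replicate]
  have hlen : cs.length = (cs.zip slots).length := by
    rw [List.length_zip, hslen, Nat.min_self]
  apply List.ext_getElem (by simpa using hlen)
  intro i hi1 hi2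
  simp only [List.getElem_map, List.getElem_zip]
  have hi : i < cs.length := by simpa using hi1
  have hcs : cs[i]? = some cs[i] := List.getElem?_eq_getElem hi
  have hrep : (List.replicate cs.length
      (none : Option (List (String × String))))[i]? = some none := by
    rw [List.getElem?_eq_getElem (by simpa using hi)]
    simp
  have hslot : slots[i]? = some (findJob cs[i] bs) := by
    rw [hslots, findJob]
    exact fill_getElem? cs bs hpre.1 i cs[i] hcs _ _ (by simp) hrep
  have hslot' : slots[i] = findJob cs[i] bs := by
    have := List.getElem?_eq_getElem (l := slots) (by omega : i < slots.length)
    rw [this] at hslot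
    exact Option.some.inj hslot
  rw [lookup_eq_findJob cs[i] bs hpre.1, hslot']
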